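-- pv_equiv track=rewrite | github.com/kxbk100/NK_quant | src_backtesting/playback/3_f1_参数遍历.py | filter_config_transform_class
-- ===== SOURCE A (Python) =====
-- def filter_config_transform_class(filter_config):
--     filter_class_list = []
--     for _filter in filter_config:
--         if 'fl' in _filter:
--             filter_class_list.append(_filter.split('_fl_')[0])
--         elif 'None' in _filter:
--             filter_class_list=[]
--         else:
--             filter_class_list.append(_filter)
--     return filter_class_list
-- ===== SOURCE B (Python) =====
-- def filter_config_transform_class(filter_config):
--     # Locate the last "reset" element (contains 'None' but not 'fl'), then
--     # build the output in one comprehension from the elements after it.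
--     cut = -1
--     i = 0
--     for e in filter_config:
--         if 'None' in e and 'fl' not in e:
--             cut = i
--         i += 1
--     return [e.split('_fl_')[0] if 'fl' in e else e
--             for e in filter_config[cut + 1:]]
-- ===== Notes on version B (the rewrite author's own statement) =====
-- stated objective: alternative
-- what changed: Replaces the accumulate-then-clear fold (appending and emptying a list as it goes) with a locate-the-cut-point pass that finds the index of the last reset element ('None' in e, 'fl' not in e) and then builds the result in a single comprehension over the suffix after it.
import Mathlib
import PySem

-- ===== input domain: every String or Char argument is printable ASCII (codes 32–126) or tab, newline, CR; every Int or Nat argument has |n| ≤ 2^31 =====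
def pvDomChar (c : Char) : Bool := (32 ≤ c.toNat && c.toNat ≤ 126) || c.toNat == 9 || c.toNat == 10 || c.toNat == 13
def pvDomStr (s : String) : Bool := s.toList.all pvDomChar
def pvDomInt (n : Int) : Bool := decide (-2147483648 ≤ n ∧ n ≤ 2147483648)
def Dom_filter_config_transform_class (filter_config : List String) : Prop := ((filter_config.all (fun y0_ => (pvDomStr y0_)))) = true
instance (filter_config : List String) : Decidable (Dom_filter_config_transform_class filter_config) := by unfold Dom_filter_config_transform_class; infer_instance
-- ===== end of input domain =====

-- B replaces A's accumulate-then-clear fold with locating the last reset element and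
-- mapping the suffix after it (alternative decomposition, same cost).

-- ===== PORT A =====
def filter_config_transform_class (filter_config : List String) : List String :=
  filter_config.foldl (fun filter_class_list _filter =>
    if PySem.Str.isIn "fl" _filter then
      filter_class_list ++ [PySem.List.pyGetD ((PySem.Str.split? _filter "_fl_").getD []) 0 ""]
    else if PySem.Str.isIn "None" _filter then
      []
    else
      filter_class_list ++ [_filter]) []

-- ===== PORT B =====
def filter_config_transform_class_alt (filter_config : List String) : List String :=
  -- cut = index of the last element with 'None' in e and 'fl' not in e, else -1
  let cut : Int := (filter_config.foldl (fun (st : Int × Int) e =>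
      (st.1 + 1, if PySem.Str.isIn "None" e && !(PySem.Str.isIn "fl" e) then st.1 else st.2))
      (0, -1)).2
  (PySem.List.slice filter_config (some (cut + 1)) none).map (fun e =>
    if PySem.Str.isIn "fl" e then PySem.List.pyGetD ((PySem.Str.split? e "_fl_").getD []) 0 "" else e)

-- ===== PRECONDITION & SPEC =====
def Spec_filter_config_transform_class (filter_config : List String) (out : List String) : Prop := out = filter_config_transform_class_alt filter_config
instance (filter_config : List String) (out : List String) : Decidable (Spec_filter_config_transform_class filter_config out) := by unfold Spec_filter_config_transform_class; infer_instance

-- ===== CLAIM (what is proved, stated in full; the proofs are below) =====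
def Claim_equal_filter_config_transform_class : Prop := ∀ (filter_config : List String), Dom_filter_config_transform_class filter_config → Spec_filter_config_transform_class filter_config (filter_config_transform_class filter_config)

-- ===== LEMMAS AND PROOFS =====

-- the per-element transform both programs apply to kept elements
def pvKeep (e : String) : String :=
  if PySem.Str.isIn "fl" e then PySem.List.pyGetD ((PySem.Str.split? e "_fl_").getD []) 0 "" else e

-- A's loop body
def pvStep (filter_class_list : List String) (_filter : String) : List String :=
  if PySem.Str.isIn "fl" _filter then
    filter_class_list ++ [PySem.List.pyGetD ((PySem.Str.split? _filter "_fl_").getD []) 0 ""]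
  else if PySem.Str.isIn "None" _filter then
    []
  else
    filter_class_list ++ [_filter]

lemma pvA_eq (xs : List String) : filter_config_transform_class xs = xs.foldl pvStep [] := rfl

-- B's cut-finding fold
def pvCutSt (xs : List String) : Int × Int :=
  xs.foldl (fun (st : Int × Int) e =>
      (st.1 + 1, if PySem.Str.isIn "None" e && !(PySem.Str.isIn "fl" e) then st.1 else st.2))
    (0, -1)

lemma pvCutSt_append (xs : List String) (x : String) :
    pvCutSt (xs ++ [x]) =
      ((pvCutSt xs).1 + 1,
       if PySem.Str.isIn "None" x && !(PySem.Str.isIn "fl" x) then (pvCutSt xs).1 else (pvCutSt xs).2) := by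
  simp only [pvCutSt, List.foldl_append, List.foldl_cons, List.foldl_nil]

lemma pvCutSt_fst (xs : List String) : (pvCutSt xs).1 = (xs.length : Int) := by
  induction xs using List.reverseRecOn with
  | nil => rfl
  | append_singleton xs x ih =>
    rw [pvCutSt_append]
    simp only [ih, List.length_append, List.length_singleton]
    push_cast
    ring

lemma pvCutSt_bounds (xs : List String) :
    -1 ≤ (pvCutSt xs).2 ∧ (pvCutSt xs).2 < (xs.length : Int) := by
  induction xs using List.reverseRecOn with
  | nil => simp [pvCutSt]
  | append_singleton xs x ih =>
    rw [pvCutSt_append]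
    simp only [List.length_append, List.length_singleton]
    split
    · rw [pvCutSt_fst]; push_cast; omega
    · push_cast; omega

lemma pv_main (xs : List String) :
    filter_config_transform_class xs =
      (xs.drop ((pvCutSt xs).2 + 1).toNat).map pvKeep := by
  induction xs using List.reverseRecOn with
  | nil => rfl
  | append_singleton xs x ih =>
    have hb := pvCutSt_bounds xs
    have hle : ((pvCutSt xs).2 + 1).toNat ≤ xs.length := by omega
    rw [pvA_eq, List.foldl_append, List.foldl_cons, List.foldl_nil, ← pvA_eq, pvCutSt_append]
    by_cases hfl : PySem.Str.isIn "fl" x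
    · have hr : (PySem.Str.isIn "None" x && !(PySem.Str.isIn "fl" x)) = false := by
        rw [hfl]; simp
      rw [pvStep, if_pos hfl, hr, if_neg (by simp), ih,
        List.drop_append_of_le_length hle, List.map_append, List.map_cons, List.map_nil,
        pvKeep, if_pos hfl]
    · have hfl' : PySem.Str.isIn "fl" x = false := Bool.eq_false_iff.mpr hfl
      by_cases hn : PySem.Str.isIn "None" x
      · have hr : (PySem.Str.isIn "None" x && !(PySem.Str.isIn "fl" x)) = true := by
          rw [hn, hfl']; rfl
        rw [pvStep, if_neg hfl, if_pos hn, hr, if_pos rfl, pvCutSt_fst]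
        have h1 : (((xs.length : Int)) + 1).toNat = xs.length + 1 := by omega
        rw [h1]
        simp
      · have hn' : PySem.Str.isIn "None" x = false := Bool.eq_false_iff.mpr hn
        have hr : (PySem.Str.isIn "None" x && !(PySem.Str.isIn "fl" x)) = false := by
          rw [hn', hfl']; rfl
        rw [pvStep, if_neg hfl, if_neg hn, hr, if_neg (by simp), ih,
          List.drop_append_of_le_length hle, List.map_append, List.map_cons, List.map_nil,
          pvKeep, if_neg hfl]

-- ===== VERDICT (by name: the statement is the Claim_ definition above) =====
theorem filter_config_transform_class_spec : Claim_equal_filter_config_transform_class := by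
  intro xs _
  unfold Spec_filter_config_transform_class filter_config_transform_class_alt
  have hb := pvCutSt_bounds xs
  show filter_config_transform_class xs =
    List.map (fun e =>
      if PySem.Str.isIn "fl" e then PySem.List.pyGetD ((PySem.Str.split? e "_fl_").getD []) 0 "" else e)
      (PySem.List.slice xs (some ((pvCutSt xs).2 + 1)) none)
  rw [PySem.List.slice_from xs (by omega : (0:Int) ≤ (pvCutSt xs).2 + 1)]
  exact pv_main xs
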